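-- pv_equiv track=rewrite | github.com/alikellaway/String-Encryption | EnDeCrypt.py | letter_to_number_translation
-- ===== SOURCE A (Python) =====
-- def letter_to_number_translation(string, data1, data2, data3, data4):
--     string_number_storage = []
--     for i in string:
--         for keys in data1:
--             if i == keys:
--                 string_number_storage.append(data1[keys])
--         for keys in data2:
--             if i == keys:
--                 string_number_storage.append(data2[keys])
--         for keys in data3:
--             if i == keys:
--                 string_number_storage.append(data3[keys])
--         for keys in data4:
--             if i == keys:
--                 string_number_storage.append(data4[keys])
--     return string_number_storage
-- ===== SOURCE B (Python) =====
-- def letter_to_number_translation(string, data1, data2, data3, data4):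
--     combined = {}
--     for data in (data1, data2, data3, data4):
--         for key, value in data.items():
--             combined.setdefault(key, []).append(value)
--     result = []
--     for ch in string:
--         result.extend(combined.get(ch, ()))
--     return result
-- ===== Notes on version B (the rewrite author's own statement) =====
-- stated objective: faster
-- what changed: Instead of scanning all four dicts' keys for every character, B builds one combined char->list-of-values index in a preprocessing pass and then makes a single lookup per character.
import Mathlib
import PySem

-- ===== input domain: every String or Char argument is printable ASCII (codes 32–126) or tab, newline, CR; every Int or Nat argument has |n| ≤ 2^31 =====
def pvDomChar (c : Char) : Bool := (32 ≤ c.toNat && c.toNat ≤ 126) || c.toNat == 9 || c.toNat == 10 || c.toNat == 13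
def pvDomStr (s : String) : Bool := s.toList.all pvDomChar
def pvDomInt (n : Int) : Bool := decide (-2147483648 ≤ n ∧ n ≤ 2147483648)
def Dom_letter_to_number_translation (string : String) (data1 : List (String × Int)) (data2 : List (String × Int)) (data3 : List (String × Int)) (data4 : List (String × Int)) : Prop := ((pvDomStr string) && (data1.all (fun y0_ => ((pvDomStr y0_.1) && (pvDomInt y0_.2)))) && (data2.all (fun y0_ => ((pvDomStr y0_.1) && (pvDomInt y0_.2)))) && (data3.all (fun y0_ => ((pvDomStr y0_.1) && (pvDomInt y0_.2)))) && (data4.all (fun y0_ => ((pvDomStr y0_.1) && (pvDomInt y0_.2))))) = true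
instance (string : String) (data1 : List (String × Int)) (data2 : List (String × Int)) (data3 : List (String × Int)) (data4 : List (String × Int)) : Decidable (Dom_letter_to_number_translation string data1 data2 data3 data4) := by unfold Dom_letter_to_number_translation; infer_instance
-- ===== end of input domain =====

-- B replaces A's four per-character key scans with one combined char->values index built once, then
-- a single lookup per character (faster: index-first pass instead of repeated scanning).

-- ===== PORT A =====
-- data1[keys] : first-match dict lookup; the key comes from the iteration, so it is present.
def pvDictGet (d : List (String × Int)) (k : String) : Int :=
  ((PySem.Dict.mk d).get? k).getD 0

def letter_to_number_translation (string : String) (data1 : List (String × Int)) (data2 : List (String × Int)) (data3 : List (String × Int)) (data4 : List (String × Int)) : List Int :=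
  string.toList.foldl (fun storage i =>
    let s := String.singleton i      -- Python iterates a string by 1-char strings
    let storage := data1.foldl (fun a p => if s == p.1 then a ++ [pvDictGet data1 p.1] else a) storage
    let storage := data2.foldl (fun a p => if s == p.1 then a ++ [pvDictGet data2 p.1] else a) storage
    let storage := data3.foldl (fun a p => if s == p.1 then a ++ [pvDictGet data3 p.1] else a) storage
    let storage := data4.foldl (fun a p => if s == p.1 then a ++ [pvDictGet data4 p.1] else a) storage
    storage) []

-- ===== PORT B =====
-- combined.setdefault(key, []).append(value)  ==  modify key [] (· ++ [value])
def pvCombined (data1 data2 data3 data4 : List (String × Int)) : PySem.Dict String (List Int) :=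
  (data1 ++ data2 ++ data3 ++ data4).foldl (fun d p => d.modify p.1 [] (· ++ [p.2])) PySem.Dict.empty

def letter_to_number_translation_alt (string : String) (data1 : List (String × Int)) (data2 : List (String × Int)) (data3 : List (String × Int)) (data4 : List (String × Int)) : List Int :=
  let combined := pvCombined data1 data2 data3 data4
  string.toList.foldl (fun result ch => result ++ combined.getD (String.singleton ch) []) []

-- ===== PRECONDITION & SPEC =====
-- Each data argument is a Python dict, rendered here as its association list: Pre_ states exactly
-- that (distinct keys); no actual input of the Python function is excluded.
def Pre_letter_to_number_translation (string : String) (data1 : List (String × Int)) (data2 : List (String × Int)) (data3 : List (String × Int)) (data4 : List (String × Int)) : Prop :=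
  (data1.map Prod.fst).Nodup ∧ (data2.map Prod.fst).Nodup ∧ (data3.map Prod.fst).Nodup ∧ (data4.map Prod.fst).Nodup
instance (string : String) (data1 : List (String × Int)) (data2 : List (String × Int)) (data3 : List (String × Int)) (data4 : List (String × Int)) : Decidable (Pre_letter_to_number_translation string data1 data2 data3 data4) := by unfold Pre_letter_to_number_translation; infer_instance

def pvWitness_letter_to_number_translation : String × (List (String × Int)) × (List (String × Int)) × (List (String × Int)) × (List (String × Int)) :=
  ("ab", [("a", 1)], [("b", 2)], [], [("a", 3), ("c", 4)])

def Spec_letter_to_number_translation (string : String) (data1 : List (String × Int)) (data2 : List (String × Int)) (data3 : List (String × Int)) (data4 : List (String × Int)) (out : List Int) : Prop := out = letter_to_number_translation_alt string data1 data2 data3 data4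
instance (string : String) (data1 : List (String × Int)) (data2 : List (String × Int)) (data3 : List (String × Int)) (data4 : List (String × Int)) (out : List Int) : Decidable (Spec_letter_to_number_translation string data1 data2 data3 data4 out) := by unfold Spec_letter_to_number_translation; infer_instance

-- ===== CLAIM (what is proved, stated in full; the proofs are below) =====
def Claim_equal_letter_to_number_translation : Prop := ∀ (string : String) (data1 : List (String × Int)) (data2 : List (String × Int)) (data3 : List (String × Int)) (data4 : List (String × Int)), Dom_letter_to_number_translation string data1 data2 data3 data4 → Pre_letter_to_number_translation string data1 data2 data3 data4 → Spec_letter_to_number_translation string data1 data2 data3 data4 (letter_to_number_translation string data1 data2 data3 data4)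

-- ===== LEMMAS AND PROOFS =====

-- one dict's inner scan, as a filter-map
lemma scan_eq_filter_map (d : List (String × Int)) (hn : (d.map Prod.fst).Nodup) (s : String) (a : List Int) :
    d.foldl (fun a p => if s == p.1 then a ++ [pvDictGet d p.1] else a) a
      = a ++ (d.filter (fun p => p.1 == s)).map Prod.snd := by
  rw [PySem.List.foldl_append_if (fun p => s == p.1) (fun p => pvDictGet d p.1) d a]
  have hf : d.filter (fun p => s == p.1) = d.filter (fun p => p.1 == s) :=
    List.filter_congr (fun p _ => by simp [eq_comm])
  rw [hf]
  congr 1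
  apply List.map_congr_left
  intro p hp
  have hpd : p ∈ d := (List.mem_filter.1 hp).1
  have hget : (PySem.Dict.mk d).get? p.1 = some p.2 :=
    PySem.Dict.get?_of_mem_items (PySem.Dict.mk d) (by simpa using hpd)
      (by simpa [PySem.Dict.keys] using hn)
  simp [pvDictGet, hget]

lemma combined_getD (data1 data2 data3 data4 : List (String × Int)) (c : String) :
    (pvCombined data1 data2 data3 data4).getD c []
      = ((data1 ++ data2 ++ data3 ++ data4).filter (fun p => p.1 == c)).map Prod.snd := by
  unfold pvCombined
  rw [PySem.Dict.getD_foldl_modify_append]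
  simp [PySem.Dict.getD_empty]

-- ===== VERDICT (by name: the statement is the Claim_ definition above) =====
theorem letter_to_number_translation_spec : Claim_equal_letter_to_number_translation := by
  intro string data1 data2 data3 data4 _ hpre
  obtain ⟨h1, h2, h3, h4⟩ := hpre
  unfold Spec_letter_to_number_translation
  unfold letter_to_number_translation letter_to_number_translation_alt
  suffices h : ∀ (cs : List Char) (acc : List Int),
      cs.foldl (fun storage i =>
        let s := String.singleton i
        let storage := data1.foldl (fun a p => if s == p.1 then a ++ [pvDictGet data1 p.1] else a) storage
        let storage := data2.foldl (fun a p => if s == p.1 then a ++ [pvDictGet data2 p.1] else a) storage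
        let storage := data3.foldl (fun a p => if s == p.1 then a ++ [pvDictGet data3 p.1] else a) storage
        let storage := data4.foldl (fun a p => if s == p.1 then a ++ [pvDictGet data4 p.1] else a) storage
        storage) acc
        = cs.foldl (fun result ch =>
            result ++ (pvCombined data1 data2 data3 data4).getD (String.singleton ch) []) acc by
    exact h string.toList []
  intro cs
  induction cs with
  | nil => intro acc; rfl
  | cons c cs ih =>
    intro acc
    simp only [List.foldl_cons]
    rw [ih]
    congr 1
    rw [scan_eq_filter_map data1 h1, scan_eq_filter_map data2 h2,
        scan_eq_filter_map data3 h3, scan_eq_filter_map data4 h4, combined_getD]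
    simp [List.filter_append, List.append_assoc]
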